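-- pv_equiv track=rewrite | github.com/tomasgpastore/open-agent-runtime | assistant_cli/graph/builder.py | _pick_tool
-- ===== SOURCE A (Python) =====
-- def _pick_tool(available_tools: list[str], preferred: list[str]) -> str | None:
--     if not available_tools:
--         return None
--     available_set = set(available_tools)
--     for candidate in preferred:
--         if candidate in available_set:
--             return candidate
--         for tool_name in available_tools:
--             if tool_name.endswith(f"_{candidate}"):
--                 return tool_name
--     return None
-- ===== SOURCE B (Python) =====
-- def _pick_tool(available_tools: list[str], preferred: list[str]) -> str | None:
--     available_set = set(available_tools)
--     index = {}
--     for tool_name in available_tools: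
--         for i, ch in enumerate(tool_name):
--             if ch == "_":
--                 index.setdefault(tool_name[i + 1:], tool_name)
--     for candidate in preferred:
--         if candidate in available_set:
--             return candidate
--         if candidate in index:
--             return index[candidate]
--     return None
-- ===== Notes on version B (the rewrite author's own statement) =====
-- stated objective: alternative
-- what changed: Replaces A's per-candidate rescan of available_tools for a matching '_'-suffix by a suffix-index dict built once over available_tools (each underscore-anchored suffix mapped to the first tool carrying it), so each preferred candidate is resolved by two O(1) lookups.
import Mathlib
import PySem

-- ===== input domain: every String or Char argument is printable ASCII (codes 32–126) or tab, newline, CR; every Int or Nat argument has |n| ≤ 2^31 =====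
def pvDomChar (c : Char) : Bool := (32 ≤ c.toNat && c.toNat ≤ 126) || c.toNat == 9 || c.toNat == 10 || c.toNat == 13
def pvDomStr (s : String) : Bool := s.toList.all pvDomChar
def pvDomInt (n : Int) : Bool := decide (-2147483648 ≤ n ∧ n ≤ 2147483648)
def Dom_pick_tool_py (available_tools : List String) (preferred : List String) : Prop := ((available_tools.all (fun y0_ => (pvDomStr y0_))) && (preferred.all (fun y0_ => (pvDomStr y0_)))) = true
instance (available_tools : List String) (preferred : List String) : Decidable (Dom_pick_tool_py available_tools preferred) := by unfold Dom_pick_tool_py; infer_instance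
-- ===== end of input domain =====

-- B replaces A's per-candidate rescan of available_tools by a suffix index (dict of all
-- underscore-anchored suffixes → first tool carrying them) built once; alternative decomposition.

-- ===== PORT A =====
-- the 'for candidate in preferred' loop; the inner 'for tool_name in available_tools'
-- first-match scan is find?
def pickLoopA (available_tools : List String) (available_set : PySem.Set String) :
    List String → Option String
  | [] => none
  | c :: rest =>
    if PySem.Set.contains available_set c then some c
    else
      match available_tools.find? (fun t => PySem.Str.endswith t ("_" ++ c)) with
      | some t => some t
      | none => pickLoopA available_tools available_set rest

def pick_tool_py (available_tools : List String) (preferred : List String) : Option String :=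
  if available_tools = [] then none
  else pickLoopA available_tools (PySem.Set.ofList available_tools) preferred

-- ===== PORT B =====
-- the underscore-anchored suffixes of a name, in position order
-- ('for i, ch in enumerate(tool_name): if ch == "_": … tool_name[i+1:] …')
def sufsB : List Char → List String
  | [] => []
  | ch :: rest => if ch = '_' then String.ofList rest :: sufsB rest else sufsB rest

-- 'index.setdefault(tool_name[i+1:], tool_name)' over all tools
def buildIndexB (available_tools : List String) : PySem.Dict String String :=
  available_tools.foldl
    (fun d t => (sufsB t.toList).foldl (fun d s => d.setdefault s t) d)
    PySem.Dict.empty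

def pickLoopB (available_set : PySem.Set String) (index : PySem.Dict String String) :
    List String → Option String
  | [] => none
  | c :: rest =>
    if PySem.Set.contains available_set c then some c
    else
      match index.get? c with
      | some t => some t
      | none => pickLoopB available_set index rest

def pick_tool_py_alt (available_tools : List String) (preferred : List String) : Option String :=
  pickLoopB (PySem.Set.ofList available_tools) (buildIndexB available_tools) preferred

-- ===== PRECONDITION & SPEC =====
def Spec_pick_tool_py (available_tools : List String) (preferred : List String) (out : Option String) : Prop := out = pick_tool_py_alt available_tools preferred
instance (available_tools : List String) (preferred : List String) (out : Option String) : Decidable (Spec_pick_tool_py available_tools preferred out) := by unfold Spec_pick_tool_py; infer_instance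

-- ===== CLAIM (what is proved, stated in full; the proofs are below) =====
def Claim_equal_pick_tool_py : Prop := ∀ (available_tools : List String) (preferred : List String), Dom_pick_tool_py available_tools preferred → Spec_pick_tool_py available_tools preferred (pick_tool_py available_tools preferred)

-- ===== LEMMAS AND PROOFS =====

theorem ofList_inj (cs rest : List Char) : String.ofList cs = String.ofList rest ↔ cs = rest :=
  ⟨fun h => by simpa using congrArg String.toList h, fun h => by rw [h]⟩

theorem mem_sufsB_iff (cs l : List Char) :
    String.ofList cs ∈ sufsB l ↔ ('_' :: cs) <:+ l := by
  induction l with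
  | nil => simp [sufsB]
  | cons a rest ih =>
    rw [List.suffix_cons_iff]
    by_cases h : a = '_'
    · subst h
      simp [sufsB, ih, ofList_inj]
    · simp [sufsB, h, ih, Ne.symm h]

theorem endswith_eq_mem_sufs (t c : String) :
    PySem.Str.endswith t ("_" ++ c) = decide (c ∈ sufsB t.toList) := by
  rw [Bool.eq_iff_iff]
  simp only [decide_eq_true_eq, PySem.Str.endswith_eq, PySem.Chars.endswith_iff]
  have h1 : ("_" ++ c).toList = '_' :: c.toList := by simp
  rw [h1]
  have := mem_sufsB_iff c.toList t.toList
  simpa using this.symm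

theorem foldl_setdefault_get? (ss : List String) (t : String)
    (d : PySem.Dict String String) (c : String) :
    (ss.foldl (fun d s => d.setdefault s t) d).get? c =
      (d.get? c).or (if c ∈ ss then some t else none) := by
  induction ss generalizing d with
  | nil => simp
  | cons s rest ih =>
    simp only [List.foldl_cons, ih, List.mem_cons]
    by_cases hc : c = s
    · subst hc
      rw [PySem.Dict.get?_setdefault_self d c t]
      cases hd : d.get? c <;> simp
    · rw [PySem.Dict.get?_setdefault_of_ne d t hc]
      simp [hc]

theorem buildIndex_get?_aux (av : List String) (d : PySem.Dict String String) (c : String) :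
    (av.foldl (fun d t => (sufsB t.toList).foldl (fun d s => d.setdefault s t) d) d).get? c =
      (d.get? c).or (av.find? (fun t => decide (c ∈ sufsB t.toList))) := by
  induction av generalizing d with
  | nil => simp
  | cons t rest ih =>
    simp only [List.foldl_cons, ih, foldl_setdefault_get?, List.find?_cons]
    by_cases hm : c ∈ sufsB t.toList <;> simp [hm]

theorem buildIndex_get? (av : List String) (c : String) :
    (buildIndexB av).get? c = av.find? (fun t => PySem.Str.endswith t ("_" ++ c)) := by
  unfold buildIndexB
  rw [buildIndex_get?_aux]
  have hp : (fun t => PySem.Str.endswith t ("_" ++ c)) =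
      (fun t => decide (c ∈ sufsB t.toList)) := by
    funext t; exact endswith_eq_mem_sufs t c
  rw [hp]
  simp [PySem.Dict.get?, PySem.Dict.empty]

theorem loops_eq (av : List String) (pref : List String) :
    pickLoopA av (PySem.Set.ofList av) pref =
      pickLoopB (PySem.Set.ofList av) (buildIndexB av) pref := by
  induction pref with
  | nil => rfl
  | cons c rest ih =>
    simp only [pickLoopA, pickLoopB, buildIndex_get?, ih]

theorem loopB_nil (pref : List String) :
    pickLoopB (PySem.Set.ofList []) (buildIndexB []) pref = none := by
  induction pref with
  | nil => rfl
  | cons c rest ih =>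
    simp only [pickLoopB, ih]
    simp [PySem.Set.ofList, PySem.Set.contains, buildIndexB, PySem.Dict.get?, PySem.Dict.empty]

-- ===== VERDICT (by name: the statement is the Claim_ definition above) =====
theorem pick_tool_py_spec : Claim_equal_pick_tool_py := by
  intro av pref _
  unfold Spec_pick_tool_py pick_tool_py
  split
  · next h => subst h; exact (loopB_nil pref).symm
  · exact loops_eq av pref
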